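-- pv_equiv track=rewrite | github.com/ES94/emulador-colocacion-memoria | tp1.py | primer_ajuste
-- ===== SOURCE A (Python) =====
-- def primer_ajuste(memoria, procesos):
--     """Primer Ajuste
--
--     >>> primer_ajuste([], [])
--     ([], [])
--
--     >>> primer_ajuste([], [[1, 5]])
--     ([], [1])
--
--     >>> primer_ajuste([[10, None]], [[1, 5]])
--     ([[10, 1]], [])
--
--     >>> primer_ajuste([[15, None], [5, None], [30, None]], \
--                       [[1, 10], [2, 3], [3, 45]])
--     ([[15, 1], [5, 2], [30, None]], [3])
--
--     >>> primer_ajuste([], [[1, 5], [2, 3]])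
--     ([], [1, 2])
--     """
--
--     no_colocados = []   # Procesos que no se pudieron colocar en la memoria
--
--     for proc in procesos:
--         exito = False
--
--         for part in memoria:
--             if part[1] == None and part[0] >= proc[1]:
--                 part[1] = proc[0]
--                 exito = True
--                 break
--
--         if not exito:
--             no_colocados.append(proc[0])
--
--     return memoria, no_colocados
-- ===== SOURCE B (Python) =====
-- # First-fit via a tournament (max) tree over the initially-free partitions:
-- # descend to the leftmost free partition with capacity >= need, then mark it used.
-- # Like A, mutates `memoria` in place (occupied slots are written before returning).
--
-- NEG = -(1 << 40)  # below any capacity; marks an already-used leaf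
--
--
-- def _build(items):
--     # items: non-empty list of (capacity, index) leaves
--     if len(items) == 1:
--         return items[0]                      # leaf: (cap, idx)
--     mid = len(items) // 2
--     l = _build(items[:mid])
--     r = _build(items[mid:])
--     return (max(l[0], r[0]), l, r)           # node: (max, left, right)
--
--
-- def _alloc(t, need):
--     # leftmost leaf with cap >= need; marks it used; returns (new tree, idx or None)
--     if t[0] < need:
--         return t, None
--     if len(t) == 2:
--         return (NEG, t[1]), t[1]
--     if t[1][0] >= need:
--         l2, i = _alloc(t[1], need)
--         return (max(l2[0], t[2][0]), l2, t[2]), i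
--     r2, i = _alloc(t[2], need)
--     return (max(t[1][0], r2[0]), t[1], r2), i
--
--
-- def primer_ajuste(memoria, procesos):
--     libres = [(part[0], i) for i, part in enumerate(memoria) if part[1] is None]
--     tree = _build(libres) if libres else None
--     asig = []
--     no_colocados = []
--     for proc in procesos:
--         need = proc[1]
--         if tree is not None and tree[0] >= need:
--             tree, i = _alloc(tree, need)
--             asig.append((i, proc[0]))
--         else:
--             no_colocados.append(proc[0])
--     for i, pid in asig:
--         memoria[i][1] = pid
--     return memoria, no_colocados
-- ===== Notes on version B (the rewrite author's own statement) =====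
-- stated objective: alternative
-- what changed: Replaces A's per-process linear rescan of the partition list by a tournament max-tree built once over the free partitions (leftmost-fit descent with point update, O(log n) per query), collecting assignments and writing them into memoria in one final pass; on typical inputs A's scan stops early, so no measured speedup is claimed.
-- outside the precondition, e.g. on primer_ajuste([[]], []): A returns ([[]], []), B raises IndexError; on primer_ajuste([], [[1]]): A returns ([], [1]), B raises IndexError; on primer_ajuste([[5, 3]], [[2]]): A returns ([[5, 3]], [2]), B raises IndexError
import Mathlib
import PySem

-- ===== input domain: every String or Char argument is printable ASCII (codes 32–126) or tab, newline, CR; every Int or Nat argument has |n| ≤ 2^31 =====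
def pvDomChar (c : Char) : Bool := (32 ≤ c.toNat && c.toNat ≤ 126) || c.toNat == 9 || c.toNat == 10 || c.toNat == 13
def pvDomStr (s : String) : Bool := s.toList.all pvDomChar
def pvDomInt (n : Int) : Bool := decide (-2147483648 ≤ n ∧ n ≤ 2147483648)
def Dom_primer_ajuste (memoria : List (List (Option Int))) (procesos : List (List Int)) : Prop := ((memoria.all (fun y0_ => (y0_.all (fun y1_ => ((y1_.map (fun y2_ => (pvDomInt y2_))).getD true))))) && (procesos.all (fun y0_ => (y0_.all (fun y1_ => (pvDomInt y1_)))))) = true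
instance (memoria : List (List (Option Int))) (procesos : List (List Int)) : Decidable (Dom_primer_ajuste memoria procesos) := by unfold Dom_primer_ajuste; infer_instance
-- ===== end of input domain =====

-- B is a different algorithm (tournament max-tree over the free partitions instead of a per-process
-- linear rescan); both A and B mutate `memoria` in place in Python — the equivalence proved here is
-- about the returned value (final list state coincides as well, by the same assignments).

-- ===== PORT A =====
-- inner `for part in memoria: …` loop of A (returns the updated memoria and `exito`)
def paScan (p0 need : Int) : List (List (Option Int)) → List (List (Option Int)) × Bool
  | [] => ([], false)
  | part :: rest =>
    match PySem.List.pyGet? part 1 with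
    | some none =>
      match PySem.List.pyGet? part 0 with
      | some (some cap) =>
        if need ≤ cap then ((PySem.List.pySetD part 1 (some p0)) :: rest, true)
        else
          let s := paScan p0 need rest
          (part :: s.1, s.2)
      | _ =>  -- Python raises TypeError here (None >= int); excluded by Pre_
          let s := paScan p0 need rest
          (part :: s.1, s.2)
    | some (some _) =>
        let s := paScan p0 need rest
        (part :: s.1, s.2)
    | none =>  -- Python raises IndexError here (len(part) < 2); excluded by Pre_
        let s := paScan p0 need rest
        (part :: s.1, s.2)

def paStep (st : List (List (Option Int)) × List Int) (proc : List Int) :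
    List (List (Option Int)) × List Int :=
  let s := paScan (PySem.List.pyGetD proc 0 0) (PySem.List.pyGetD proc 1 0) st.1
  if s.2 then (s.1, st.2) else (s.1, st.2 ++ [PySem.List.pyGetD proc 0 0])

def primer_ajuste (memoria : List (List (Option Int))) (procesos : List (List Int)) :
    List (List (Option Int)) × List Int :=
  procesos.foldl paStep (memoria, [])

-- ===== PORT B =====
def pvNegInf : Int := -1099511627776  -- NEG = -(1 << 40) in Source B

inductive FTree where
  | leaf (cap idx : Int)
  | node (mx : Int) (l r : FTree)
deriving Repr, DecidableEq

def FTree.top : FTree → Int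
  | .leaf c _ => c
  | .node m _ _ => m

def ftBuild : List (Int × Int) → FTree
  | [] => .leaf pvNegInf (-1)
  | [x] => .leaf x.1 x.2
  | x :: y :: rest =>
      let l := ftBuild ((x :: y :: rest).take ((x :: y :: rest).length / 2))
      let r := ftBuild ((x :: y :: rest).drop ((x :: y :: rest).length / 2))
      .node (max l.top r.top) l r
termination_by l => l.length
decreasing_by
  all_goals simp [List.length_take, List.length_drop]; omega

def ftAlloc (t : FTree) (need : Int) : FTree × Option Int :=
  match t with
  | .leaf c i => if c < need then (t, none) else (.leaf pvNegInf i, some i)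
  | .node m l r =>
    if m < need then (t, none)
    else if need ≤ l.top then
      let p := ftAlloc l need
      (.node (max p.1.top r.top) p.1 r, p.2)
    else
      let p := ftAlloc r need
      (.node (max l.top p.1.top) l p.1, p.2)

def pvCap (part : List (Option Int)) : Int :=
  match PySem.List.pyGet? part 0 with
  | some (some c) => c
  | _ => 0  -- Python would store None here and crash later; excluded by Pre_

def pvFree (s : Int) (m : List (List (Option Int))) : List (Int × Int) :=
  (PySem.List.enumerate m s).filterMap
    (fun p =>
      match PySem.List.pyGet? p.2 1 with
      | some none => some (pvCap p.2, p.1)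
      | _ => none)

def pvSetSlot (m : List (List (Option Int))) (i pid : Int) : List (List (Option Int)) :=
  PySem.List.pySetD m i (PySem.List.pySetD (PySem.List.pyGetD m i []) 1 (some pid))

def pbStep (st : Option FTree × List (Int × Int) × List Int) (proc : List Int) :
    Option FTree × List (Int × Int) × List Int :=
  let need := PySem.List.pyGetD proc 1 0
  match st.1 with
  | some t =>
    if need ≤ t.top then
      let p := ftAlloc t need
      match p.2 with
      | some i => (some p.1, st.2.1 ++ [(i, PySem.List.pyGetD proc 0 0)], st.2.2)
      | none => (some p.1, st.2.1, st.2.2)  -- unreachable: the root max admits a fit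
    else (st.1, st.2.1, st.2.2 ++ [PySem.List.pyGetD proc 0 0])
  | none => (none, st.2.1, st.2.2 ++ [PySem.List.pyGetD proc 0 0])

def primer_ajuste_alt (memoria : List (List (Option Int))) (procesos : List (List Int)) :
    List (List (Option Int)) × List Int :=
  let libres := pvFree 0 memoria
  let t0 : Option FTree := if libres.isEmpty then none else some (ftBuild libres)
  let res := procesos.foldl pbStep (t0, [], [])
  (res.2.1.foldl (fun mm q => pvSetSlot mm q.1 q.2) memoria, res.2.2)

-- ===== PRECONDITION & SPEC =====
-- Pre_ excludes inputs on which Python A raises (a partition entry shorter than 2, a None capacity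
-- on a free partition, a process entry shorter than 2 while a free partition remains) together with
-- the nearby degenerate shapes on which A still returns but B's eager free-list construction and
-- eager proc[1] read themselves raise (short or malformed entries that A's lazy scan never touches).
def Pre_primer_ajuste (memoria : List (List (Option Int))) (procesos : List (List Int)) : Prop :=
  (∀ part ∈ memoria, 2 ≤ part.length ∧ (part.getD 1 none = none → part.getD 0 none ≠ none)) ∧
  (∀ proc ∈ procesos, 2 ≤ proc.length)
instance (memoria : List (List (Option Int))) (procesos : List (List Int)) : Decidable (Pre_primer_ajuste memoria procesos) := by unfold Pre_primer_ajuste; infer_instance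

def pvWitness_primer_ajuste : List (List (Option Int)) × List (List Int) :=
  ([[some 15, none], [some 5, none], [some 30, none]], [[1, 10], [2, 3], [3, 45]])

def Spec_primer_ajuste (memoria : List (List (Option Int))) (procesos : List (List Int)) (out : List (List (Option Int)) × List Int) : Prop := out = primer_ajuste_alt memoria procesos
instance (memoria : List (List (Option Int))) (procesos : List (List Int)) (out : List (List (Option Int)) × List Int) : Decidable (Spec_primer_ajuste memoria procesos out) := by unfold Spec_primer_ajuste; infer_instance

-- ===== CLAIM (what is proved, stated in full; the proofs are below) =====
def Claim_equal_primer_ajuste : Prop := ∀ (memoria : List (List (Option Int))) (procesos : List (List Int)), Dom_primer_ajuste memoria procesos → Pre_primer_ajuste memoria procesos → Spec_primer_ajuste memoria procesos (primer_ajuste memoria procesos)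

-- ===== LEMMAS AND PROOFS =====

theorem witness_ok : Dom_primer_ajuste pvWitness_primer_ajuste.1 pvWitness_primer_ajuste.2 ∧
    Pre_primer_ajuste pvWitness_primer_ajuste.1 pvWitness_primer_ajuste.2 := by decide


-- ---- abstract first-fit over (capacity, index) lists ----

def FTree.leaves : FTree → List (Int × Int)
  | .leaf c i => [(c, i)]
  | .node _ l r => l.leaves ++ r.leaves

def FTree.good : FTree → Prop
  | .leaf _ _ => True
  | .node m l r => m = max l.top r.top ∧ l.good ∧ r.good

def unmark (L : List (Int × Int)) : List (Int × Int) := L.filter (fun p => p.1 != pvNegInf)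

def ffL : List (Int × Int) → Int → Option (Int × List (Int × Int))
  | [], _ => none
  | q :: rest, need => if need ≤ q.1 then some (q.2, (pvNegInf, q.2) :: rest)
      else (ffL rest need).map (fun r => (r.1, q :: r.2))

def ffR : List (Int × Int) → Int → Option (Int × List (Int × Int))
  | [], _ => none
  | q :: rest, need => if need ≤ q.1 then some (q.2, rest)
      else (ffR rest need).map (fun r => (r.1, q :: r.2))

def absStep (st : List (Int × Int) × List (Int × Int) × List Int) (proc : List Int) :
    List (Int × Int) × List (Int × Int) × List Int :=
  match ffL st.1 (PySem.List.pyGetD proc 1 0) with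
  | some r => (r.2, st.2.1 ++ [(r.1, PySem.List.pyGetD proc 0 0)], st.2.2)
  | none => (st.1, st.2.1, st.2.2 ++ [PySem.List.pyGetD proc 0 0])

def PreM (m : List (List (Option Int))) : Prop :=
  ∀ part ∈ m, 2 ≤ part.length ∧ (part.getD 1 none = none → part.getD 0 none ≠ none)

-- ---- tree lemmas ----

lemma top_le (t : FTree) (hg : t.good) : ∀ p ∈ t.leaves, p.1 ≤ t.top := by
  revert hg
  induction t with
  | leaf c i => intro _ p hp; simp [FTree.leaves] at hp; simp [hp, FTree.top]
  | node m l r ihl ihr =>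
    rintro ⟨hm, hl, hr⟩ p hp
    simp only [FTree.leaves, List.mem_append] at hp
    simp only [FTree.top, hm, le_max_iff]
    rcases hp with hp | hp
    · exact Or.inl (ihl hl p hp)
    · exact Or.inr (ihr hr p hp)

lemma top_mem (t : FTree) (hg : t.good) : ∃ p ∈ t.leaves, t.top ≤ p.1 := by
  revert hg
  induction t with
  | leaf c i => intro _; exact ⟨(c, i), by simp [FTree.leaves], le_refl _⟩
  | node m l r ihl ihr =>
    rintro ⟨hm, hl, hr⟩
    rcases le_total l.top r.top with hc | hc
    · obtain ⟨p, hp, hle⟩ := ihr hr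
      exact ⟨p, by simp [FTree.leaves, hp], by simp [FTree.top, hm, max_le_iff]; exact ⟨le_trans hc hle, hle⟩⟩
    · obtain ⟨p, hp, hle⟩ := ihl hl
      exact ⟨p, by simp [FTree.leaves, hp], by simp [FTree.top, hm, max_le_iff]; exact ⟨hle, le_trans hc hle⟩⟩

lemma ffL_none_iff (L : List (Int × Int)) (need : Int) :
    ffL L need = none ↔ ∀ p ∈ L, p.1 < need := by
  induction L with
  | nil => simp [ffL]
  | cons q rest ih =>
    by_cases h : need ≤ q.1
    · simp only [ffL, if_pos h]
      constructor
      · intro h'; cases h'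
      · intro hall; exact absurd (hall q (List.mem_cons_self)) (not_lt.mpr h)
    · simp [ffL, if_neg h, ih, not_le.mp h]

lemma ffL_append (a b : List (Int × Int)) (need : Int) :
    ffL (a ++ b) need = match ffL a need with
      | some r => some (r.1, r.2 ++ b)
      | none => (ffL b need).map (fun r => (r.1, a ++ r.2)) := by
  induction a with
  | nil => simp [ffL]
  | cons q rest ih =>
    by_cases h : need ≤ q.1
    · simp [ffL, if_pos h]
    · simp only [List.cons_append, ffL, if_neg h, ih]
      cases hr : ffL rest need with
      | some r => simp
      | none =>
        cases hb : ffL b need with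
        | some r => simp
        | none => simp

lemma ffL_ffR (need : Int) (hneed : pvNegInf < need) : ∀ L : List (Int × Int),
    (ffL L need = none → ffR (unmark L) need = none) ∧
    (∀ i L', ffL L need = some (i, L') → ffR (unmark L) need = some (i, unmark L')) := by
  intro L
  induction L with
  | nil => simp [ffL, ffR, unmark]
  | cons q rest ih =>
    by_cases h : need ≤ q.1
    · have hq : q.1 ≠ pvNegInf := by
        intro he; rw [he] at h; exact absurd (lt_of_lt_of_le hneed h) (lt_irrefl _)
      constructor
      · intro h'; simp [ffL, if_pos h] at h'
      · intro i L' h'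
        simp only [ffL, if_pos h, Option.some.injEq, Prod.mk.injEq] at h'
        obtain ⟨h1, h2⟩ := h'
        subst h1; subst h2
        have hqb : (q.1 != pvNegInf) = true := by simpa using hq
        simp [unmark, List.filter_cons, hqb, ffR, if_pos h]
    · by_cases hq : q.1 = pvNegInf
      · constructor
        · intro h'
          simp only [ffL, if_neg h, Option.map_eq_none_iff] at h'
          have := ih.1 h'
          simpa [unmark, hq] using this
        · intro i L' h'
          simp only [ffL, if_neg h, Option.map_eq_some_iff] at h'
          obtain ⟨r, hr, hre⟩ := h'
          obtain ⟨h1, h2⟩ := Prod.mk.injEq .. ▸ hre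
          subst h1
          have := ih.2 r.1 r.2 (by rw [hr])
          rw [← h2]
          simpa [unmark, hq] using this
      · constructor
        · intro h'
          simp only [ffL, if_neg h, Option.map_eq_none_iff] at h'
          have := ih.1 h'
          have hqb : (q.1 != pvNegInf) = true := by simpa using hq
          simp only [unmark, List.filter_cons, hqb, if_pos rfl] at this ⊢
          simp [ffR, if_neg h, this]
        · intro i L' h'
          simp only [ffL, if_neg h, Option.map_eq_some_iff] at h'
          obtain ⟨r, hr, hre⟩ := h'
          obtain ⟨h1, h2⟩ := Prod.mk.injEq .. ▸ hre
          subst h1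
          have := ih.2 r.1 r.2 (by rw [hr])
          rw [← h2]
          have hqb : (q.1 != pvNegInf) = true := by simpa using hq
          simp only [unmark, List.filter_cons, hqb, if_pos rfl] at this ⊢
          simp [ffR, if_neg h, this]

lemma alloc_spec (need : Int) : ∀ t : FTree, t.good →
    (ffL t.leaves need = none → ftAlloc t need = (t, none)) ∧
    (∀ i L', ffL t.leaves need = some (i, L') →
      ∃ t', ftAlloc t need = (t', some i) ∧ t'.good ∧ t'.leaves = L') := by
  intro t
  induction t with
  | leaf c i =>
    intro _
    constructor
    · intro hnone
      rw [ffL_none_iff] at hnone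
      have := hnone (c, i) (by simp [FTree.leaves])
      simp [ftAlloc, this]
    · intro i' L' hsome
      simp only [FTree.leaves, ffL] at hsome
      by_cases h : need ≤ c
      · simp only [if_pos h, Option.some.injEq, Prod.mk.injEq] at hsome
        obtain ⟨h1, h2⟩ := hsome
        subst h1; subst h2
        exact ⟨.leaf pvNegInf i, by simp [ftAlloc, not_lt.mpr h], trivial, by simp [FTree.leaves]⟩
      · simp [if_neg h] at hsome
  | node m l r ihl ihr =>
    rintro ⟨hm, hl, hr⟩
    have hleq : FTree.leaves (.node m l r) = l.leaves ++ r.leaves := rfl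
    constructor
    · intro hnone
      rw [hleq, ffL_none_iff] at hnone
      have hmlt : m < need := by
        obtain ⟨p, hp, hple⟩ := top_mem l hl
        obtain ⟨q, hq, hqle⟩ := top_mem r hr
        have h1 := hnone p (by simp [hp])
        have h2 := hnone q (by simp [hq])
        rw [hm]
        exact max_lt (lt_of_le_of_lt hple h1) (lt_of_le_of_lt hqle h2)
      simp [ftAlloc, hmlt]
    · intro i L' hsome
      rw [hleq, ffL_append] at hsome
      by_cases hmlt : m < need
      · exfalso
        have hln : ffL l.leaves need = none := (ffL_none_iff _ _).mpr (fun p hp =>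
          lt_of_le_of_lt (top_le l hl p hp) (lt_of_le_of_lt (hm ▸ le_max_left _ _) hmlt))
        have hrn : ffL r.leaves need = none := (ffL_none_iff _ _).mpr (fun p hp =>
          lt_of_le_of_lt (top_le r hr p hp) (lt_of_le_of_lt (hm ▸ le_max_right _ _) hmlt))
        rw [hln] at hsome
        simp [hrn] at hsome
      · by_cases hcase : need ≤ l.top
        · have hne : ffL l.leaves need ≠ none := by
            simp only [ne_eq, ffL_none_iff]; push_neg
            obtain ⟨p, hp, hple⟩ := top_mem l hl
            exact ⟨p, hp, le_trans hcase hple⟩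
          obtain ⟨⟨i0, a'⟩, hll⟩ := Option.ne_none_iff_exists'.mp hne
          rw [hll] at hsome
          simp only [Option.some.injEq, Prod.mk.injEq] at hsome
          obtain ⟨h1, h2⟩ := hsome
          subst h1
          obtain ⟨t', ht', hg', hlv⟩ := (ihl hl).2 i0 a' hll
          refine ⟨.node (max t'.top r.top) t' r, ?_, ⟨rfl, hg', hr⟩, ?_⟩
          · simp [ftAlloc, hmlt, hcase, ht']
          · simp [FTree.leaves, hlv, h2]
        · have hln : ffL l.leaves need = none := (ffL_none_iff _ _).mpr (fun p hp =>
            lt_of_le_of_lt (top_le l hl p hp) (not_le.mp hcase))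
          rw [hln] at hsome
          simp only [Option.map_eq_some_iff] at hsome
          obtain ⟨⟨i0, b'⟩, hrr, heq⟩ := hsome
          simp only [Prod.mk.injEq] at heq
          obtain ⟨h1, h2⟩ := heq
          subst h1
          obtain ⟨t', ht', hg', hlv⟩ := (ihr hr).2 i0 b' hrr
          refine ⟨.node (max l.top t'.top) l t', ?_, ⟨rfl, hl, hg'⟩, ?_⟩
          · simp [ftAlloc, hmlt, hcase, ht']
          · simp [FTree.leaves, hlv, ← h2]

lemma build_ok : ∀ (n : Nat) (l : List (Int × Int)), l.length ≤ n → l ≠ [] →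
    (ftBuild l).leaves = l ∧ (ftBuild l).good := by
  intro n
  induction n with
  | zero =>
    intro l hlen hne
    cases l with
    | nil => exact absurd rfl hne
    | cons x xs => simp at hlen
  | succ n ih =>
    intro l hlen hne
    match l with
    | [x] => exact ⟨by simp [ftBuild, FTree.leaves], by simp [ftBuild]; trivial⟩
    | x :: y :: rest =>
      have h2 : 2 ≤ (x :: y :: rest).length := by simp
      have hmid1 : 1 ≤ (x :: y :: rest).length / 2 := by omega
      have hmid2 : (x :: y :: rest).length / 2 < (x :: y :: rest).length := by omega
      have htake : ((x :: y :: rest).take ((x :: y :: rest).length / 2)).length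
          = (x :: y :: rest).length / 2 := by rw [List.length_take]; omega
      have hdrop : ((x :: y :: rest).drop ((x :: y :: rest).length / 2)).length
          = (x :: y :: rest).length - (x :: y :: rest).length / 2 := by rw [List.length_drop]
      have ih1 := ih ((x :: y :: rest).take ((x :: y :: rest).length / 2))
        (by omega) (by intro he; rw [he] at htake; simp at htake; omega)
      have ih2 := ih ((x :: y :: rest).drop ((x :: y :: rest).length / 2))
        (by omega) (by intro he; rw [he] at hdrop; simp at hdrop; omega)
      have heq : ftBuild (x :: y :: rest) =
          .node (max (ftBuild ((x :: y :: rest).take ((x :: y :: rest).length / 2))).top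
                     (ftBuild ((x :: y :: rest).drop ((x :: y :: rest).length / 2))).top)
                (ftBuild ((x :: y :: rest).take ((x :: y :: rest).length / 2)))
                (ftBuild ((x :: y :: rest).drop ((x :: y :: rest).length / 2))) := by
        rw [ftBuild]
      rw [heq]
      refine ⟨?_, rfl, ih1.2, ih2.2⟩
      simp only [FTree.leaves, ih1.1, ih2.1]
      exact List.take_append_drop _ _

-- ---- B loop refines the abstract loop ----

lemma B_loop (procs : List (List Int)) : ∀ (t : FTree) (a : List (Int × Int)) (nn : List Int),
    t.good →
    (procs.foldl pbStep (some t, a, nn)).2 = (procs.foldl absStep (t.leaves, a, nn)).2 := by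
  induction procs with
  | nil => intro t a nn _; rfl
  | cons proc rest ih =>
    intro t a nn hg
    simp only [List.foldl_cons]
    by_cases hc : PySem.List.pyGetD proc 1 0 ≤ t.top
    · have hne : ffL t.leaves (PySem.List.pyGetD proc 1 0) ≠ none := by
        simp only [ne_eq, ffL_none_iff]; push_neg
        obtain ⟨p, hp, hple⟩ := top_mem t hg
        exact ⟨p, hp, le_trans hc hple⟩
      obtain ⟨⟨i, L'⟩, hff⟩ := Option.ne_none_iff_exists'.mp hne
      obtain ⟨t', ht', hg', hlv⟩ := (alloc_spec _ t hg).2 i L' hff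
      have hb : pbStep (some t, a, nn) proc = (some t', a ++ [(i, PySem.List.pyGetD proc 0 0)], nn) := by
        simp [pbStep, hc, ht']
      have ha : absStep (t.leaves, a, nn) proc = (L', a ++ [(i, PySem.List.pyGetD proc 0 0)], nn) := by
        simp [absStep, hff]
      rw [hb, ha, ← hlv]
      exact ih t' _ _ hg'
    · have hff : ffL t.leaves (PySem.List.pyGetD proc 1 0) = none :=
        (ffL_none_iff _ _).mpr (fun p hp => lt_of_le_of_lt (top_le t hg p hp) (not_le.mp hc))
      have hb : pbStep (some t, a, nn) proc = (some t, a, nn ++ [PySem.List.pyGetD proc 0 0]) := by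
        simp [pbStep, hc]
      have ha : absStep (t.leaves, a, nn) proc = (t.leaves, a, nn ++ [PySem.List.pyGetD proc 0 0]) := by
        simp [absStep, hff]
      rw [hb, ha]
      exact ih t _ _ hg

lemma B_none (procs : List (List Int)) : ∀ (a : List (Int × Int)) (nn : List Int),
    (procs.foldl pbStep (none, a, nn)).2 = (procs.foldl absStep ([], a, nn)).2 := by
  induction procs with
  | nil => intro a nn; rfl
  | cons proc rest ih =>
    intro a nn
    simp only [List.foldl_cons]
    have hb : pbStep (none, a, nn) proc = (none, a, nn ++ [PySem.List.pyGetD proc 0 0]) := rfl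
    have ha : absStep ([], a, nn) proc = ([], a, nn ++ [PySem.List.pyGetD proc 0 0]) := by
      simp [absStep, ffL]
    rw [hb, ha]
    exact ih _ _

-- ---- A loop refines the abstract loop ----

lemma pyGet1 {α : Type} (a b : α) (t : List α) : PySem.List.pyGet? (a :: b :: t) 1 = some b := by
  have h : (0:Int) ≤ (t.length:Int) + 1 := by positivity
  simp [PySem.List.pyGet?, PySem.List.pyIdx?, h]

lemma pyGet0 {α : Type} (a b : α) (t : List α) : PySem.List.pyGet? (a :: b :: t) 0 = some a := by
  have h : (0:Int) ≤ (t.length:Int) + 1 := by positivity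
  simp [PySem.List.pyGet?, PySem.List.pyIdx?, h]

lemma pySet1 {α : Type} (a b v : α) (t : List α) :
    PySem.List.pySetD (a :: b :: t) 1 v = a :: v :: t := by
  have h : (0:Int) ≤ (t.length:Int) + 1 := by positivity
  simp [PySem.List.pySetD, PySem.List.pySet?, PySem.List.pyIdx?, h]

lemma pvFree_cons (s : Int) (part : List (Option Int)) (rest : List (List (Option Int))) :
    pvFree s (part :: rest) =
      (match PySem.List.pyGet? part 1 with
       | some none => (pvCap part, s) :: pvFree (s + 1) rest
       | _ => pvFree (s + 1) rest) := by
  cases h : PySem.List.pyGet? part 1 with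
  | none => simp [pvFree, PySem.List.enumerate_cons, List.filterMap_cons, h]
  | some v =>
    cases v with
    | none => simp [pvFree, PySem.List.enumerate_cons, List.filterMap_cons, h]
    | some w => simp [pvFree, PySem.List.enumerate_cons, List.filterMap_cons, h]

lemma PreM_set (m : List (List (Option Int))) (j : Nat) (p0 : Int) (h : PreM m) :
    PreM (m.set j (PySem.List.pySetD (m.getD j []) 1 (some p0))) := by
  intro part hpart
  by_cases hj : j < m.length
  · rcases List.mem_or_eq_of_mem_set hpart with hmem | heq
    · exact h part hmem
    · subst heq
      have hgd : m.getD j [] = m[j] := List.getD_eq_getElem m [] hj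
      have hm := h m[j] (List.getElem_mem hj)
      match hpj : m[j] with
      | [] => rw [hpj] at hm; simp at hm
      | [_] => rw [hpj] at hm; simp at hm
      | av :: bv :: tv =>
        rw [hgd, hpj, pySet1]
        refine ⟨by simp, ?_⟩
        intro habs
        simp [List.getD] at habs
  · rw [List.set_eq_of_length_le (by omega)] at hpart
    exact h part hpart

lemma scanA (p0 need : Int) : ∀ (m : List (List (Option Int))) (s : Int), PreM m →
    (ffR (pvFree s m) need = none → paScan p0 need m = (m, false)) ∧
    (∀ i L', ffR (pvFree s m) need = some (i, L') →
      ∃ j : Nat, j < m.length ∧ i = s + (j : Int) ∧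
        paScan p0 need m = (m.set j (PySem.List.pySetD (m.getD j []) 1 (some p0)), true) ∧
        pvFree s (m.set j (PySem.List.pySetD (m.getD j []) 1 (some p0))) = L') := by
  intro m
  induction m with
  | nil =>
    intro s _
    constructor
    · intro _; rfl
    · intro i L' h
      simp [pvFree, PySem.List.enumerate_nil, ffR] at h
  | cons part rest ih =>
    intro s hPre
    have hp := hPre part List.mem_cons_self
    have hPrest : PreM rest := fun q hq => hPre q (List.mem_cons_of_mem _ hq)
    obtain ⟨hplen, hpcap⟩ := hp
    rcases part with _ | ⟨av, part1⟩
    · simp at hplen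
    rcases part1 with _ | ⟨bv, tv⟩
    · simp at hplen
    cases bv with
    | none =>
      have hcapne : av ≠ none := by
        have h := hpcap
        simp [List.getD] at h
        exact h
      obtain ⟨c, rfl⟩ := Option.ne_none_iff_exists'.mp hcapne
      have hcap : pvCap (some c :: none :: tv) = c := by simp [pvCap, pyGet0]
      have hfc : pvFree s ((some c :: (none : Option Int) :: tv) :: rest)
          = (c, s) :: pvFree (s + 1) rest := by
        rw [pvFree_cons]; simp [pyGet1, hcap]
      have hscan_cons : paScan p0 need ((some c :: (none : Option Int) :: tv) :: rest) =
          if need ≤ c then ((PySem.List.pySetD (some c :: (none : Option Int) :: tv) 1 (some p0)) :: rest, true)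
          else ((some c :: (none : Option Int) :: tv) :: (paScan p0 need rest).1, (paScan p0 need rest).2) := by
        simp only [paScan, pyGet1, pyGet0]
      by_cases hfit : need ≤ c
      · constructor
        · intro hnone
          rw [hfc] at hnone
          simp [ffR, hfit] at hnone
        · intro i L' hsome
          rw [hfc] at hsome
          simp only [ffR, if_pos hfit, Option.some.injEq, Prod.mk.injEq] at hsome
          obtain ⟨h1, h2⟩ := hsome
          refine ⟨0, by simp, by rw [← h1]; simp, ?_, ?_⟩
          · rw [hscan_cons, if_pos hfit]
            simp [List.getD]
          · simp only [List.set_cons_zero, List.getD_cons_zero, pySet1]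
            rw [pvFree_cons]
            simp only [pyGet1]
            exact h2
      · constructor
        · intro hnone
          rw [hfc] at hnone
          simp only [ffR, if_neg hfit, Option.map_eq_none_iff] at hnone
          have hrec := (ih (s + 1) hPrest).1 hnone
          rw [hscan_cons, if_neg hfit, hrec]
        · intro i L' hsome
          rw [hfc] at hsome
          simp only [ffR, if_neg hfit, Option.map_eq_some_iff] at hsome
          obtain ⟨r0, hr0, heq⟩ := hsome
          simp only [Prod.mk.injEq] at heq
          obtain ⟨h1, h2⟩ := heq
          obtain ⟨j, hj, hij, hscan, hfree'⟩ := (ih (s + 1) hPrest).2 r0.1 r0.2 (by rw [hr0])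
          refine ⟨j + 1, by simp [hj], by rw [← h1, hij]; push_cast; ring, ?_, ?_⟩
          · rw [hscan_cons, if_neg hfit, hscan]
            simp [List.set_cons_succ, List.getD_cons_succ]
          · simp only [List.set_cons_succ, List.getD_cons_succ]
            rw [pvFree_cons]
            simp only [pyGet1, hcap, hfree', h2]
    | some v =>
      have hfc : pvFree s ((av :: (some v : Option Int) :: tv) :: rest)
          = pvFree (s + 1) rest := by
        rw [pvFree_cons]; simp [pyGet1]
      have hscan_cons : paScan p0 need ((av :: (some v : Option Int) :: tv) :: rest) =
          ((av :: (some v : Option Int) :: tv) :: (paScan p0 need rest).1, (paScan p0 need rest).2) := by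
        simp only [paScan, pyGet1]
      constructor
      · intro hnone
        rw [hfc] at hnone
        have hrec := (ih (s + 1) hPrest).1 hnone
        rw [hscan_cons, hrec]
      · intro i L' hsome
        rw [hfc] at hsome
        obtain ⟨j, hj, hij, hscan, hfree'⟩ := (ih (s + 1) hPrest).2 i L' hsome
        refine ⟨j + 1, by simp [hj], by rw [hij]; push_cast; ring, ?_, ?_⟩
        · rw [hscan_cons, hscan]
          simp [List.set_cons_succ, List.getD_cons_succ]
        · simp only [List.set_cons_succ, List.getD_cons_succ]
          rw [pvFree_cons]
          simp only [pyGet1, hfree']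

lemma abs_acc (procs : List (List Int)) : ∀ (L : List (Int × Int)) (a : List (Int × Int)) (nn : List Int),
    procs.foldl absStep (L, a, nn) =
      ((procs.foldl absStep (L, [], [])).1,
       a ++ (procs.foldl absStep (L, [], [])).2.1,
       nn ++ (procs.foldl absStep (L, [], [])).2.2) := by
  induction procs with
  | nil => intro L a nn; simp
  | cons proc rest ih =>
    intro L a nn
    simp only [List.foldl_cons]
    cases hff : ffL L (PySem.List.pyGetD proc 1 0) with
    | none =>
      have h1 : absStep (L, a, nn) proc = (L, a, nn ++ [PySem.List.pyGetD proc 0 0]) := by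
        simp [absStep, hff]
      have h2 : absStep (L, [], []) proc = (L, [], [PySem.List.pyGetD proc 0 0]) := by
        simp [absStep, hff]
      rw [h1, h2, ih, ih L [] [PySem.List.pyGetD proc 0 0]]
      simp
    | some r =>
      have h1 : absStep (L, a, nn) proc = (r.2, a ++ [(r.1, PySem.List.pyGetD proc 0 0)], nn) := by
        simp [absStep, hff]
      have h2 : absStep (L, [], []) proc = (r.2, [(r.1, PySem.List.pyGetD proc 0 0)], []) := by
        simp [absStep, hff]
      rw [h1, h2, ih, ih r.2 [(r.1, PySem.List.pyGetD proc 0 0)] []]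
      simp

lemma A_loop : ∀ (procs : List (List Int)) (m : List (List (Option Int))) (nn : List Int)
    (L : List (Int × Int)), PreM m → pvFree 0 m = unmark L →
    (∀ proc ∈ procs, pvNegInf < PySem.List.pyGetD proc 1 0) →
    procs.foldl paStep (m, nn) =
      ((procs.foldl absStep (L, [], [])).2.1.foldl (fun mm q => pvSetSlot mm q.1 q.2) m,
       nn ++ (procs.foldl absStep (L, [], [])).2.2) := by
  intro procs
  induction procs with
  | nil => intro m nn L _ _ _; simp
  | cons proc rest ih =>
    intro m nn L hPre hL hneed
    have hn := hneed proc List.mem_cons_self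
    have hneed' : ∀ q ∈ rest, pvNegInf < PySem.List.pyGetD q 1 0 :=
      fun q hq => hneed q (List.mem_cons_of_mem _ hq)
    simp only [List.foldl_cons]
    cases hff : ffL L (PySem.List.pyGetD proc 1 0) with
    | none =>
      have hR : ffR (pvFree 0 m) (PySem.List.pyGetD proc 1 0) = none := by
        rw [hL]; exact (ffL_ffR _ hn L).1 hff
      have hsc := (scanA (PySem.List.pyGetD proc 0 0) (PySem.List.pyGetD proc 1 0) m 0 hPre).1 hR
      have hstep : paStep (m, nn) proc = (m, nn ++ [PySem.List.pyGetD proc 0 0]) := by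
        simp [paStep, hsc]
      have habs : absStep (L, [], []) proc = (L, [], [PySem.List.pyGetD proc 0 0]) := by
        simp [absStep, hff]
      rw [hstep, habs, abs_acc rest L [] [PySem.List.pyGetD proc 0 0]]
      rw [ih m (nn ++ [PySem.List.pyGetD proc 0 0]) L hPre hL hneed']
      simp
    | some r =>
      have hR : ffR (pvFree 0 m) (PySem.List.pyGetD proc 1 0) = some (r.1, unmark r.2) := by
        rw [hL]; exact (ffL_ffR _ hn L).2 r.1 r.2 (by rw [hff])
      obtain ⟨j, hj, hij, hscan, hfree'⟩ :=
        (scanA (PySem.List.pyGetD proc 0 0) (PySem.List.pyGetD proc 1 0) m 0 hPre).2 r.1 (unmark r.2) hR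
      have hstep : paStep (m, nn) proc =
          (m.set j (PySem.List.pySetD (m.getD j []) 1 (some (PySem.List.pyGetD proc 0 0))), nn) := by
        simp [paStep, hscan]
      have habs : absStep (L, [], []) proc = (r.2, [(r.1, PySem.List.pyGetD proc 0 0)], []) := by
        simp [absStep, hff]
      have hPre' := PreM_set m j (PySem.List.pyGetD proc 0 0) hPre
      rw [hstep, habs, abs_acc rest r.2 [(r.1, PySem.List.pyGetD proc 0 0)] []]
      rw [ih (m.set j (PySem.List.pySetD (m.getD j []) 1 (some (PySem.List.pyGetD proc 0 0)))) nn r.2 hPre' hfree' hneed']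
      have hslot : pvSetSlot m r.1 (PySem.List.pyGetD proc 0 0)
          = m.set j (PySem.List.pySetD (m.getD j []) 1 (some (PySem.List.pyGetD proc 0 0))) := by
        rw [hij]
        simp [pvSetSlot]
      simp only [List.singleton_append, List.foldl_cons]
      rw [hslot]
      simp

-- ---- bounds from Dom ----

lemma free_cap_big (memoria : List (List (Option Int))) (procesos : List (List Int))
    (hD : Dom_primer_ajuste memoria procesos) (hP : PreM memoria) :
    ∀ p ∈ pvFree 0 memoria, pvNegInf < p.1 := by
  intro p hp
  simp only [pvFree, List.mem_filterMap] at hp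
  obtain ⟨q, hq, hfq⟩ := hp
  rw [PySem.List.mem_enumerate_iff] at hq
  obtain ⟨k, hk, rfl⟩ := hq
  cases h1 : PySem.List.pyGet? memoria[k] 1 with
  | none => rw [h1] at hfq; simp at hfq
  | some v =>
    cases v with
    | some w => rw [h1] at hfq; simp at hfq
    | none =>
      rw [h1] at hfq
      simp only [Option.some.injEq] at hfq
      have hmem : memoria[k] ∈ memoria := List.getElem_mem hk
      obtain ⟨hlen, hcap⟩ := hP memoria[k] hmem
      have hg1 : PySem.List.pyGet? memoria[k] 1 = some memoria[k][1] := by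
        have h := PySem.List.pyGet?_ofNat memoria[k] 1 (by omega)
        simpa using h
      rw [hg1] at h1
      have hgd1 : memoria[k].getD 1 none = none := by
        rw [List.getD_eq_getElem _ _ (by omega)]
        exact Option.some.inj h1
      have hne := hcap hgd1
      rw [List.getD_eq_getElem _ _ (by omega)] at hne
      obtain ⟨c, hc⟩ := Option.ne_none_iff_exists'.mp hne
      have hg0 : PySem.List.pyGet? memoria[k] 0 = some (some c) := by
        rw [PySem.List.pyGet?_zero, List.getElem?_eq_getElem (by omega), hc]
      have hcv : pvCap memoria[k] = c := by simp [pvCap, hg0]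
      simp only [Dom_primer_ajuste, Bool.and_eq_true, List.all_eq_true] at hD
      have hoc : (some c : Option Int) ∈ memoria[k] := by
        rw [← hc]; exact List.getElem_mem (by omega)
      have hb := hD.1 memoria[k] hmem (some c) hoc
      simp only [Option.map_some, Option.getD_some, pvDomInt, decide_eq_true_eq] at hb
      rw [← hfq]
      simp only [hcv, pvNegInf]
      omega

lemma need_big (memoria : List (List (Option Int))) (procesos : List (List Int))
    (hD : Dom_primer_ajuste memoria procesos) :
    ∀ proc ∈ procesos, pvNegInf < PySem.List.pyGetD proc 1 0 := by
  intro proc hproc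
  by_cases h2 : 2 ≤ proc.length
  · rw [PySem.List.pyGetD_eq_getElem proc 0 (by norm_num)
        (by exact_mod_cast (by omega : (1:Int) < (proc.length : Int)))]
    simp only [Dom_primer_ajuste, Bool.and_eq_true, List.all_eq_true] at hD
    have hb := hD.2 proc hproc proc[(1:Int).toNat] (List.getElem_mem (by omega))
    simp only [pvDomInt, decide_eq_true_eq] at hb
    simp only [pvNegInf]
    omega
  · have hnone : PySem.List.pyGet? proc 1 = none := by
      rw [PySem.List.pyGet?_eq_none_iff]
      intro hr
      rcases hr with ⟨_, hlt⟩
      omega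
    rw [PySem.List.pyGetD_of_none proc 1 0 hnone]
    simp [pvNegInf]

-- ===== VERDICT (by name: the statement is the Claim_ definition above) =====
theorem primer_ajuste_spec : Claim_equal_primer_ajuste := by
  intro memoria procesos hD hPre
  unfold Spec_primer_ajuste
  unfold primer_ajuste primer_ajuste_alt
  have hPreM : PreM memoria := hPre.1
  have hneed := need_big memoria procesos hD
  have hcap := free_cap_big memoria procesos hD hPreM
  have hunmark : unmark (pvFree 0 memoria) = pvFree 0 memoria := by
    unfold unmark
    apply List.filter_eq_self.mpr
    intro p hp
    simpa using ne_of_gt (hcap p hp)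
  by_cases hemp : pvFree 0 memoria = []
  · have hA := A_loop procesos memoria [] [] hPreM (by rw [hemp]; rfl) hneed
    rw [hA]
    simp only [hemp, List.isEmpty_nil, if_true]
    rw [B_none procesos [] []]
    simp
  · have hne : (pvFree 0 memoria).isEmpty = false := by simpa using hemp
    obtain ⟨hlv, hgd⟩ := build_ok (pvFree 0 memoria).length (pvFree 0 memoria) le_rfl hemp
    have hB := B_loop procesos (ftBuild (pvFree 0 memoria)) [] [] hgd
    rw [hlv] at hB
    have hA := A_loop procesos memoria [] (pvFree 0 memoria) hPreM (by rw [hunmark]) hneed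
    rw [hA]
    simp only [hne, Bool.false_eq_true, if_false]
    rw [hB]
    simp
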